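-- pv_equiv track=rewrite | github.com/SowmyaArunachalam/GeeksForGeeks | python/check_string.py | check
-- ===== SOURCE A (Python) =====
-- def check (s):
--     # your code here
--     l=[]
--     s1=list(set(s))
--     for i in s1:
--         if i not in l :
--             l.append(i)
--     if(len(l)==1):
--         return True
--     else:
--         return False
-- ===== SOURCE B (Python) =====
-- def check(s):
--     return len(s) > 0 and all(c == s[0] for c in s)
-- ===== Notes on version B (the rewrite author's own statement) =====
-- stated objective: simpler
-- what changed: Replaces building a set, re-deduplicating it into a list and testing its length against 1 by a single early-exit scan comparing every character with the first (empty string guarded to False).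
import Mathlib
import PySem

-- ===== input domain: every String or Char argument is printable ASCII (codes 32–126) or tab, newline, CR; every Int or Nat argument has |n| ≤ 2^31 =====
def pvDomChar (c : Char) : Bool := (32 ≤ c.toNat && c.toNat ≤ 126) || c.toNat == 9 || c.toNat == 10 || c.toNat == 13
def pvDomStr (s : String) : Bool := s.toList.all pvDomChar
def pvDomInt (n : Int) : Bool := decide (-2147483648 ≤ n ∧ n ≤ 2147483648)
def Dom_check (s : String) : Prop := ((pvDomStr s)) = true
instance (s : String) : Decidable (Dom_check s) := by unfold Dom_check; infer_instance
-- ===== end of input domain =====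

-- B replaces A's set-then-dedup-then-length test by a single scan comparing each char with the first; simpler, same result.

-- ===== PORT A =====
def check (s : String) : Bool :=
  -- l=[]; s1=list(set(s)); for i in s1: if i not in l: l.append(i); return len(l)==1
  let s1 : List Char := PySem.Set.ofList s.toList
  let l : List Char := s1.foldl (fun l i => if l.contains i then l else l ++ [i]) []
  l.length == 1

-- ===== PORT B =====
def check_alt (s : String) : Bool :=
  -- len(s) > 0 and all(c == s[0] for c in s)
  match s.toList with
  | [] => false
  | c :: cs => (c :: cs).all (fun x => x == c)

-- ===== PRECONDITION & SPEC =====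
def Spec_check (s : String) (out : Bool) : Prop := out = check_alt s
instance (s : String) (out : Bool) : Decidable (Spec_check s out) := by unfold Spec_check; infer_instance

-- ===== CLAIM (what is proved, stated in full; the proofs are below) =====
def Claim_equal_check : Prop := ∀ (s : String), Dom_check s → Spec_check s (check s)

-- ===== LEMMAS AND PROOFS =====

-- A's dedup loop is the identity on a list that is already nodup.
theorem foldl_dedup_nodup : ∀ (xs acc : List Char), (acc ++ xs).Nodup →
    xs.foldl (fun l i => if l.contains i then l else l ++ [i]) acc = acc ++ xs := by
  intro xs
  induction xs with
  | nil => intro acc _; simp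
  | cons x xs ih =>
    intro acc h
    have hx : ¬ acc.contains x := by
      simp only [List.contains_eq_mem, decide_eq_true_eq]
      intro hm
      exact (List.nodup_append.mp h).2.2 x hm x (List.mem_cons_self ..) rfl
    simp only [List.foldl_cons, if_neg hx]
    have h' : ((acc ++ [x]) ++ xs).Nodup := by simpa using h
    simpa using ih (acc ++ [x]) h'

theorem length_le_foldl_add : ∀ (xs acc : List Char),
    acc.length ≤ (xs.foldl PySem.Set.add acc).length := by
  intro xs
  induction xs with
  | nil => intro acc; simp
  | cons x xs ih =>
    intro acc
    refine le_trans ?_ (ih (PySem.Set.add acc x))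
    unfold PySem.Set.add
    split <;> simp

theorem ofList_len_one : ∀ (cs : List Char) (c : Char),
    ((cs.foldl PySem.Set.add [c]).length == 1) = cs.all (fun x => x == c) := by
  intro cs
  induction cs with
  | nil => intro c; rfl
  | cons x xs ih =>
    intro c
    by_cases hx : x = c
    · subst hx
      have : PySem.Set.add [x] x = [x] := by unfold PySem.Set.add; simp
      rw [List.foldl_cons, this, ih x]; simp [List.all_cons]

    · have hadd : PySem.Set.add [c] x = [c, x] := by
        simp [PySem.Set.add, List.contains_eq_mem]
        exact hx
      rw [List.foldl_cons, hadd]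
      have h2 := length_le_foldl_add xs [c, x]
      simp only [List.length_cons, List.length_nil] at h2
      have hfalse : ((xs.foldl PySem.Set.add [c, x]).length == 1) = false := by
        simp only [beq_eq_false_iff_ne]
        omega
      have hxc : (x == c) = false := by simp [hx]
      rw [hfalse]
      simp [List.all_cons, hxc]

-- ===== VERDICT (by name: the statement is the Claim_ definition above) =====
theorem check_spec : Claim_equal_check := by
  intro s _
  unfold Spec_check check check_alt
  simp only []
  have hl := foldl_dedup_nodup (PySem.Set.ofList s.toList) []
    (by simp [PySem.Set.nodup_ofList])
  simp only [List.nil_append] at hl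
  rw [hl]
  cases h : s.toList with
  | nil => simp [PySem.Set.ofList]
  | cons c cs =>
    have : PySem.Set.ofList (c :: cs) = cs.foldl PySem.Set.add [c] := by
      rw [PySem.Set.ofList_eq_foldl]
      simp [List.foldl_cons, PySem.Set.add]
    rw [this]
    simpa using ofList_len_one cs c
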